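-- pv_equiv track=rewrite | github.com/eknyazeva/yaset | yaset/nn/train.py | compute_bucket_boundaries
-- ===== SOURCE A (Python) =====
-- from collections import defaultdict
--
-- def compute_bucket_boundaries(sequence_lengths, batch_size):
--     """
--     Compute bucket boundaries based on the sequence lengths
--     :param sequence_lengths: sequence length to consider
--     :param batch_size: mini-batch size used for learning
--     :return: buckets boundaries (list)
--     """
--
--     # Step 1 - Gather number of sequences per length
--     seq_count_by_length = defaultdict(int)
--
--     for length in sequence_lengths:
--         seq_count_by_length[length] += 1
--
--     # Step 2 - Compute bucket boundaries
--     # Each buckets must contains at least four mini-batches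
--     output_buckets = list()
--     current_count = 0
--
--     for len_seq, nb_seq in sorted(seq_count_by_length.items(), reverse=True):
--
--         current_count += nb_seq
--
--         if current_count >= batch_size * 4:
--             output_buckets.append(len_seq)
--             current_count = 0
--
--     if current_count < batch_size * 3 and current_count != 0:
--         output_buckets.pop(-1)
--
--     return sorted(output_buckets)
-- ===== SOURCE B (Python) =====
-- def compute_bucket_boundaries(sequence_lengths, batch_size):
--     """
--     Compute bucket boundaries based on the sequence lengths.
--     No histogram and no per-group accumulation loop: after one descending
--     sort, each bucket boundary is located directly by slicing -- jump
--     'step' elements ahead, read the value there, extend the cut to the end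
--     of that value's run via count on the tail slice, emit it and continue
--     on the remaining slice.  The leftover slice length plays the role of
--     A's final carry.
--     """
--     step = max(4 * batch_size, 1)
--     buckets = []
--     rest = sorted(sequence_lengths, reverse=True)
--     while step <= len(rest):
--         v = rest[step - 1]
--         cut = step + rest[step:].count(v)
--         buckets.append(v)
--         rest = rest[cut:]
--     if 0 < len(rest) < 3 * batch_size and buckets:
--         buckets.pop()
--     return buckets[::-1]
-- ===== Notes on version B (the rewrite author's own statement) =====
-- stated objective: alternative
-- what changed: B drops A's histogram and greedy count-accumulation loop entirely: after one descending sort it locates each bucket boundary directly by slicing -- jump max(4*batch_size,1) positions ahead, extend the cut to the end of that value's run with a count on the tail slice, emit, and recurse on the remaining slice; the leftover slice length replaces A's carry, and the result is reversed instead of re-sorted.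
-- outside the precondition, e.g. on compute_bucket_boundaries([3], 1): A raises IndexError, B returns []
import Mathlib
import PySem

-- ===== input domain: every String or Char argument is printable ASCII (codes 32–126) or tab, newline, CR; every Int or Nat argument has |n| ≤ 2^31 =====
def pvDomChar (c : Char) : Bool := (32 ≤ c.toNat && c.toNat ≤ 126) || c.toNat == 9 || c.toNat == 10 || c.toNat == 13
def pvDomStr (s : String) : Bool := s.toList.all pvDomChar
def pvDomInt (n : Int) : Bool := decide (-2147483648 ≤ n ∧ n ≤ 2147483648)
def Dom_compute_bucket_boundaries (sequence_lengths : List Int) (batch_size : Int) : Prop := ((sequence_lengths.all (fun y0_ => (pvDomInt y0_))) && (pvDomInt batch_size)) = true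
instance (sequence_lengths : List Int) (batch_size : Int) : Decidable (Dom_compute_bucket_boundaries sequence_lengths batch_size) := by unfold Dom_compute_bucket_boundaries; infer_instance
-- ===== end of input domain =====

-- B drops A's histogram and greedy count-accumulation loop: after one descending sort it
-- locates each bucket boundary directly by slicing (jump max(4*batch_size,1) ahead, extend
-- the cut to the run end via a count on the tail slice) and reverses instead of re-sorting
-- (objective: alternative, same asymptotic cost).

-- ===== PORT A =====
-- the greedy accumulation step of A's Step-2 loop
def gstep (bs : Int) (st : List Int × Int) (p : Int × Int) : List Int × Int :=
  let current_count := st.2 + p.2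
  if current_count ≥ bs * 4 then (st.1 ++ [p.1], 0) else (st.1, current_count)

def compute_bucket_boundaries (sequence_lengths : List Int) (batch_size : Int) : List Int :=
  -- Step 1: seq_count_by_length = defaultdict(int); for length in …: d[length] += 1
  let seq_count_by_length :=
    sequence_lengths.foldl (fun d length => d.modify length 0 (fun v => v + 1)) PySem.Dict.empty
  -- Step 2: greedy accumulation over sorted(d.items(), reverse=True)
  let st :=
    (PySem.List.sorted2 seq_count_by_length.items (fun p => p.1) (fun p => p.2) true).foldl
      (gstep batch_size) ([], 0)
  let output_buckets :=
    if st.2 < batch_size * 3 ∧ st.2 ≠ 0 then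
      -- output_buckets.pop(-1): raises IndexError on an empty list (those inputs are outside Pre_)
      match PySem.List.pop? st.1 with
      | some r => r.2
      | none => []
    else st.1
  PySem.List.sorted output_buckets (fun x => x) false

-- ===== PORT B =====
-- B's while-loop: slice-jump over the descending-sorted list; returns (buckets, rest)
def bloop (need : Int) (rest : List Int) (buckets : List Int) : List Int × List Int :=
  let step := (max need 1).toNat   -- Python's step = max(4*batch_size, 1); ≥ 1, toNat exact
  if h : step ≤ rest.length then
    -- v = rest[step - 1]: in range since 1 ≤ step ≤ len(rest), so getD is exact
    let v := rest.getD (step - 1) 0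
    let cut := step + (rest.drop step).count v   -- cut = step + rest[step:].count(v)
    bloop need (rest.drop cut) (buckets ++ [v])
  else (buckets, rest)
termination_by rest.length
decreasing_by
  have h1 : (1 : Int) ≤ max need 1 := le_max_right _ _
  simp only [List.length_drop]
  omega

def compute_bucket_boundaries_alt (sequence_lengths : List Int) (batch_size : Int) : List Int :=
  let st := bloop (4 * batch_size) (PySem.List.sorted sequence_lengths (fun x => x) true) []
  -- if 0 < len(rest) < 3 * batch_size and buckets: buckets.pop()
  let buckets :=
    if 0 < (st.2.length : Int) ∧ (st.2.length : Int) < 3 * batch_size ∧ st.1 ≠ [] then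
      st.1.dropLast
    else st.1
  buckets.reverse

-- ===== PRECONDITION & SPEC =====
-- Pre_ excludes exactly the inputs where A raises IndexError (pop from an empty bucket
-- list): non-empty sequence_lengths with fewer elements than 3 * batch_size.
def Pre_compute_bucket_boundaries (sequence_lengths : List Int) (batch_size : Int) : Prop :=
  ¬ (0 < sequence_lengths.length ∧ (sequence_lengths.length : Int) < 3 * batch_size)
instance (sequence_lengths : List Int) (batch_size : Int) : Decidable (Pre_compute_bucket_boundaries sequence_lengths batch_size) := by unfold Pre_compute_bucket_boundaries; infer_instance
def pvWitness_compute_bucket_boundaries : List Int × Int := ([3, 3, 7, 1], 1)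

def Spec_compute_bucket_boundaries (sequence_lengths : List Int) (batch_size : Int) (out : List Int) : Prop := out = compute_bucket_boundaries_alt sequence_lengths batch_size
instance (sequence_lengths : List Int) (batch_size : Int) (out : List Int) : Decidable (Spec_compute_bucket_boundaries sequence_lengths batch_size out) := by unfold Spec_compute_bucket_boundaries; infer_instance

-- ===== CLAIM (what is proved, stated in full; the proofs are below) =====
def Claim_equal_compute_bucket_boundaries : Prop := ∀ (sequence_lengths : List Int) (batch_size : Int), Dom_compute_bucket_boundaries sequence_lengths batch_size → Pre_compute_bucket_boundaries sequence_lengths batch_size → Spec_compute_bucket_boundaries sequence_lengths batch_size (compute_bucket_boundaries sequence_lengths batch_size)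

-- ===== LEMMAS AND PROOFS =====

-- run-length code of a list; A's sorted counter items equal (rle of the descending sort)
def rleAux : Int → Int → List Int → List (Int × Int)
  | x, n, [] => [(x, n)]
  | x, n, y :: t => if x = y then rleAux x (n + 1) t else (x, n) :: rleAux y 1 t

def rle : List Int → List (Int × Int)
  | [] => []
  | x :: t => rleAux x 1 t

theorem rleAux_fst_mem (l : List Int) (x n : Int) :
    ∀ p ∈ rleAux x n l, p.1 = x ∨ p.1 ∈ l := by
  induction l generalizing x n with
  | nil => intro p hp; simp [rleAux] at hp; simp [hp]
  | cons y t ih =>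
    intro p hp
    by_cases h : x = y
    · simp only [rleAux, if_pos h] at hp
      rcases ih x (n + 1) p hp with h1 | h1
      · exact Or.inl h1
      · exact Or.inr (List.mem_cons_of_mem _ h1)
    · simp only [rleAux, if_neg h] at hp
      rcases List.mem_cons.mp hp with h1 | h1
      · left; rw [h1]
      · rcases ih y 1 p h1 with h2 | h2
        · exact Or.inr (by simp [h2])
        · exact Or.inr (List.mem_cons_of_mem _ h2)

theorem rleAux_pairwise (l : List Int) (x n : Int)
    (hp : l.Pairwise (fun a b => b ≤ a)) (hub : ∀ y ∈ l, y ≤ x) :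
    (rleAux x n l).Pairwise (fun a b => b.1 < a.1) := by
  induction l generalizing x n with
  | nil => simp [rleAux]
  | cons y t ih =>
    rw [List.pairwise_cons] at hp
    have hyx : y ≤ x := hub y (List.mem_cons_self ..)
    by_cases h : x = y
    · simp only [rleAux, if_pos h]
      exact ih x (n + 1) hp.2 (fun z hz => le_trans (hp.1 z hz) (h ▸ hyx))
    · have hlt : y < x := lt_of_le_of_ne hyx (fun hh => h hh.symm)
      simp only [rleAux, if_neg h]
      refine List.Pairwise.cons ?_ (ih y 1 hp.2 hp.1)
      intro q hq
      rcases rleAux_fst_mem t y 1 q hq with h1 | h1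
      · simpa [h1] using hlt
      · exact lt_of_le_of_lt (hp.1 q.1 h1) hlt

theorem rleAux_mem (l : List Int) (x n : Int) (k c : Int)
    (hp : l.Pairwise (fun a b => b ≤ a)) (hub : ∀ y ∈ l, y ≤ x) :
    ((k, c) ∈ rleAux x n l) ↔
      (k = x ∧ c = n + (l.count x : Int)) ∨ (k ≠ x ∧ k ∈ l ∧ c = (l.count k : Int)) := by
  induction l generalizing x n with
  | nil => simp [rleAux, Prod.ext_iff]
  | cons y t ih =>
    rw [List.pairwise_cons] at hp
    have hyx : y ≤ x := hub y (List.mem_cons_self ..)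
    by_cases h : x = y
    · subst h
      rw [show rleAux x n (x :: t) = rleAux x (n + 1) t by simp [rleAux],
        ih x (n + 1) hp.2 (fun z hz => hp.1 z hz)]
      constructor
      · rintro (⟨hk, hc⟩ | ⟨hk, hm, hc⟩)
        · left; refine ⟨hk, ?_⟩; rw [hc]; simp [List.count_cons]; push_cast; ring
        · right
          refine ⟨hk, List.mem_cons_of_mem _ hm, ?_⟩
          rw [hc]; simp [List.count_cons, hk, Ne.symm hk]
      · rintro (⟨hk, hc⟩ | ⟨hk, hm, hc⟩)
        · left; refine ⟨hk, ?_⟩; rw [hc]; simp [List.count_cons]; push_cast; ring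
        · right
          rcases List.mem_cons.mp hm with h1 | h1
          · exact absurd h1 hk
          · refine ⟨hk, h1, ?_⟩; rw [hc]; simp [List.count_cons, hk, Ne.symm hk]
    · have hxny : x ∉ y :: t := by
        intro hm
        rcases List.mem_cons.mp hm with h1 | h1
        · exact h h1
        · have h2 := hp.1 x h1
          have hlt : y < x := lt_of_le_of_ne hyx (fun hh => h hh.symm)
          omega
      have hcx : ((y :: t).count x : Int) = 0 := by
        rw [List.count_eq_zero.mpr hxny]; rfl
      simp only [rleAux, if_neg h, List.mem_cons]
      rw [ih y 1 hp.2 (fun z hz => hp.1 z hz)]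
      constructor
      · rintro (h1 | (⟨hk, hc⟩ | ⟨hk, hm, hc⟩))
        · rw [Prod.mk.injEq] at h1
          left; exact ⟨h1.1, by rw [h1.2, hcx]; ring⟩
        · subst hk
          right
          refine ⟨fun hh => h hh.symm, Or.inl rfl, ?_⟩
          rw [hc]; simp [List.count_cons]; push_cast; ring
        · right
          have hknx : k ≠ x := by
            intro hh; subst hh; exact hxny (List.mem_cons_of_mem _ hm)
          refine ⟨hknx, Or.inr hm, ?_⟩
          rw [hc]; simp [List.count_cons, hk, Ne.symm hk]
      · rintro (⟨hk, hc⟩ | ⟨hk, hm, hc⟩)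
        · subst hk
          left; rw [Prod.mk.injEq]
          exact ⟨rfl, by rw [hc, hcx]; ring⟩
        · by_cases hky : k = y
          · subst hky
            right; left
            refine ⟨rfl, ?_⟩
            rw [hc]; simp [List.count_cons]; push_cast; ring
          · rcases hm with h1 | h1
            · exact absurd h1 hky
            · right; right
              refine ⟨hky, h1, ?_⟩
              rw [hc]; simp [List.count_cons, hky, Ne.symm hky]

theorem rle_mem (l : List Int) (k c : Int) (hp : l.Pairwise (fun a b => b ≤ a)) :
    ((k, c) ∈ rle l) ↔ (k ∈ l ∧ c = (l.count k : Int)) := by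
  cases l with
  | nil => simp [rle]
  | cons x t =>
    rw [List.pairwise_cons] at hp
    rw [show rle (x :: t) = rleAux x 1 t from rfl,
      rleAux_mem t x 1 k c hp.2 hp.1]
    constructor
    · rintro (⟨hk, hc⟩ | ⟨hk, hm, hc⟩)
      · subst hk; exact ⟨by simp, by rw [hc]; simp [List.count_cons]; push_cast; ring⟩
      · exact ⟨List.mem_cons_of_mem _ hm, by rw [hc]; simp [List.count_cons, hk, Ne.symm hk]⟩
    · rintro ⟨hm, hc⟩
      by_cases hk : k = x
      · subst hk
        left; exact ⟨rfl, by rw [hc]; simp [List.count_cons]; push_cast; ring⟩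
      · rcases List.mem_cons.mp hm with h1 | h1
        · exact absurd h1 hk
        · right; exact ⟨hk, h1, by rw [hc]; simp [List.count_cons, hk, Ne.symm hk]⟩

theorem rle_pairwise (l : List Int) (hp : l.Pairwise (fun a b => b ≤ a)) :
    (rle l).Pairwise (fun a b => b.1 < a.1) := by
  cases l with
  | nil => simp [rle]
  | cons x t =>
    rw [List.pairwise_cons] at hp
    exact rleAux_pairwise t x 1 hp.2 hp.1

theorem rle_nodup (l : List Int) (hp : l.Pairwise (fun a b => b ≤ a)) : (rle l).Nodup :=
  (rle_pairwise l hp).imp (fun h => by intro he; rw [he] at h; exact lt_irrefl _ h)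

-- sorted2 of the counter items equals the run-length code of the descending-sorted list
theorem insertBy2_pairwise (x : Int × Int) (ys : List (Int × Int))
    (h : ys.Pairwise (fun a b => b.1 ≤ a.1)) :
    (PySem.List.insertBy
        (fun a b => decide (b.1 < a.1) || !decide (a.1 < b.1) && decide (b.2 < a.2)) x ys).Pairwise
      (fun a b => b.1 ≤ a.1) := by
  induction ys with
  | nil => simp [PySem.List.insertBy]
  | cons y t ih =>
    rw [List.pairwise_cons] at h
    simp only [PySem.List.insertBy]
    split_ifs with hb
    · have hxy : y.1 ≤ x.1 := by
        rcases Bool.or_eq_true_iff.mp hb with h1 | h1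
        · exact le_of_lt (by simpa using h1)
        · have := (Bool.and_eq_true_iff.mp h1).1
          simp at this
          omega
      refine List.Pairwise.cons ?_ (List.Pairwise.cons h.1 h.2)
      intro z hz
      rcases List.mem_cons.mp hz with h1 | h1
      · rw [h1]; exact hxy
      · exact le_trans (h.1 z h1) hxy
    · have hyx : x.1 ≤ y.1 := by
        simp only [Bool.or_eq_true_iff, Bool.and_eq_true_iff, decide_eq_true_iff, not_or,
          not_and] at hb
        omega
      refine List.Pairwise.cons ?_ (ih h.2)
      intro z hz
      rcases List.mem_cons.mp ((PySem.List.insertBy_perm _ x t).mem_iff.mp hz) with h1 | h1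
      · rw [h1]; exact hyx
      · exact h.1 z h1

theorem sorted2_pairwise_fst (xs : List (Int × Int)) :
    (PySem.List.sorted2 xs (fun p => p.1) (fun p => p.2) true).Pairwise
      (fun a b => b.1 ≤ a.1) := by
  have main : ∀ (l acc : List (Int × Int)), acc.Pairwise (fun a b => b.1 ≤ a.1) →
      (l.foldl (fun acc x => PySem.List.insertBy
        (fun a b => decide (b.1 < a.1) || !decide (a.1 < b.1) && decide (b.2 < a.2)) x acc)
        acc).Pairwise (fun a b => b.1 ≤ a.1) := by
    intro l
    induction l with
    | nil => intro acc h; exact h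
    | cons x t ih => intro acc h; exact ih _ (insertBy2_pairwise x acc h)
  exact main xs [] (by simp)

theorem strict_of_weak (l : List (Int × Int))
    (h : l.Pairwise (fun a b => b.1 ≤ a.1)) (hn : (l.map Prod.fst).Nodup) :
    l.Pairwise (fun a b => b.1 < a.1) := by
  induction l with
  | nil => simp
  | cons a t ih =>
    rw [List.pairwise_cons] at h ⊢
    simp only [List.map_cons, List.nodup_cons] at hn
    refine ⟨?_, ih h.2 hn.2⟩
    intro b hb
    have hne : b.1 ≠ a.1 := by
      intro he
      exact hn.1 (he ▸ List.mem_map_of_mem hb)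
    exact lt_of_le_of_ne (h.1 b hb) hne

theorem greedy_len (bs : Int) (g : List (Int × Int)) (l : List Int) (c : Int) :
    l.length ≤ ((g.foldl (gstep bs) (l, c)).1).length := by
  induction g generalizing l c with
  | nil => simp
  | cons p t ih =>
    simp only [List.foldl_cons, gstep]
    split_ifs with h
    · have h1 := ih (l ++ [p.1]) 0
      simp at h1; omega
    · exact ih l _

theorem greedy_empty (bs : Int) (g : List (Int × Int)) (l : List Int) (c : Int)
    (h : (g.foldl (gstep bs) (l, c)).1 = l) :
    (g.foldl (gstep bs) (l, c)).2 = c + (g.map Prod.snd).sum := by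
  induction g generalizing l c with
  | nil => simp
  | cons p t ih =>
    simp only [List.foldl_cons, gstep] at h ⊢
    split_ifs at h ⊢ with hif
    · exfalso
      have h1 := greedy_len bs t (l ++ [p.1]) 0
      rw [h] at h1; simp at h1
    · have h2 := ih l (c + p.2) h
      simp only [List.map_cons, List.sum_cons]
      rw [h2]; ring

theorem greedy_sublist (bs : Int) (g : List (Int × Int)) (l : List Int) (c : Int) :
    ((g.foldl (gstep bs) (l, c)).1).Sublist (l ++ g.map Prod.fst) := by
  induction g generalizing l c with
  | nil => simp
  | cons p t ih =>
    simp only [List.foldl_cons, gstep]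
    split_ifs with h
    · have h1 := ih (l ++ [p.1]) 0
      simpa using h1
    · refine (ih l _).trans ?_
      simp only [List.map_cons]
      exact List.Sublist.append_left (List.sublist_cons_self _ _) l

theorem rleAux_sum (l : List Int) (x n : Int) :
    ((rleAux x n l).map Prod.snd).sum = n + (l.length : Int) := by
  induction l generalizing x n with
  | nil => simp [rleAux]
  | cons y t ih =>
    by_cases h : x = y
    · simp only [rleAux, if_pos h]; rw [ih]; simp; push_cast; ring
    · simp only [rleAux, if_neg h, List.map_cons, List.sum_cons]; rw [ih]; simp; push_cast; ring

theorem rle_sum (l : List Int) : ((rle l).map Prod.snd).sum = (l.length : Int) := by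
  cases l with
  | nil => simp [rle]
  | cons x t => rw [show rle (x :: t) = rleAux x 1 t from rfl, rleAux_sum]; simp only [List.length_cons]; push_cast; ring

theorem sorted2_items_eq_rle (seq : List Int) :
    PySem.List.sorted2 (PySem.Dict.counter seq).items (fun p => p.1) (fun p => p.2) true
      = rle (PySem.List.sorted seq (fun x => x) true) := by
  have hds : (PySem.List.sorted seq (fun x => x) true).Pairwise (fun a b => b ≤ a) :=
    PySem.List.sorted_pairwise_rev seq (fun x => x)
  have hitems := PySem.Dict.items_counter seq
  have hpermA : (PySem.List.sorted2 (PySem.Dict.counter seq).items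
      (fun p => p.1) (fun p => p.2) true).Perm (PySem.Dict.counter seq).items :=
    PySem.List.sorted2_perm _ _ _ _
  have hfst_items : ((PySem.Dict.counter seq).items.map Prod.fst) = PySem.Set.ofList seq := by
    rw [hitems, List.map_map]
    exact List.map_id _
  have hnd_items : (PySem.Dict.counter seq).items.Nodup := by
    refine List.Nodup.of_map Prod.fst ?_
    rw [hfst_items]; exact PySem.Set.nodup_ofList seq
  have hndA : (PySem.List.sorted2 (PySem.Dict.counter seq).items
      (fun p => p.1) (fun p => p.2) true).Nodup := hpermA.nodup_iff.mpr hnd_items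
  have hfstA : ((PySem.List.sorted2 (PySem.Dict.counter seq).items
      (fun p => p.1) (fun p => p.2) true).map Prod.fst).Nodup := by
    have := (hpermA.map Prod.fst).nodup_iff.mpr (by rw [hfst_items]; exact PySem.Set.nodup_ofList seq)
    exact this
  have hpwA : (PySem.List.sorted2 (PySem.Dict.counter seq).items
      (fun p => p.1) (fun p => p.2) true).Pairwise (fun a b => b.1 < a.1) :=
    strict_of_weak _ (sorted2_pairwise_fst _) hfstA
  have hpwR : (rle (PySem.List.sorted seq (fun x => x) true)).Pairwise (fun a b => b.1 < a.1) :=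
    rle_pairwise _ hds
  have hmem : ∀ p : Int × Int, p ∈ (PySem.Dict.counter seq).items ↔
      p ∈ rle (PySem.List.sorted seq (fun x => x) true) := by
    rintro ⟨k, c⟩
    rw [rle_mem _ k c hds, hitems]
    constructor
    · intro hm
      rcases List.mem_map.mp hm with ⟨a, ha, hfa⟩
      rw [Prod.mk.injEq] at hfa
      rcases hfa with ⟨rfl, rfl⟩
      refine ⟨?_, ?_⟩
      · rw [PySem.List.mem_sorted]; exact (PySem.Set.mem_ofList seq a).mp ha
      · rw [(PySem.List.sorted_perm seq (fun x => x) true).count_eq]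
    · rintro ⟨hm, rfl⟩
      refine List.mem_map.mpr ⟨k, ?_, ?_⟩
      · exact (PySem.Set.mem_ofList seq k).mpr ((PySem.List.mem_sorted seq _ true k).mp hm)
      · rw [Prod.mk.injEq]
        exact ⟨rfl, by rw [(PySem.List.sorted_perm seq (fun x => x) true).count_eq]⟩
  have hperm : (PySem.List.sorted2 (PySem.Dict.counter seq).items
      (fun p => p.1) (fun p => p.2) true).Perm
        (rle (PySem.List.sorted seq (fun x => x) true)) := by
    refine hpermA.trans ?_
    rw [List.perm_ext_iff_of_nodup hnd_items (rle_nodup _ hds)]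
    exact hmem
  exact List.Perm.eq_of_pairwise
    (fun a b _ _ h1 h2 => absurd h1 (by omega)) hpwA hpwR hperm

theorem sorted_eq_reverse_of_desc (l : List Int) (h : l.Pairwise (fun a b => b < a)) :
    PySem.List.sorted l (fun x => x) false = l.reverse :=
  PySem.List.sorted_id_eq_of_perm_of_pairwise l l.reverse (List.reverse_perm l)
    (List.pairwise_reverse.mpr (h.imp le_of_lt))

-- B-side: unfolding equations for bloop
theorem bloop_stop (need : Int) (rest buckets : List Int)
    (h : ¬ ((max need 1).toNat ≤ rest.length)) : bloop need rest buckets = (buckets, rest) := by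
  rw [bloop]; simp [h]

theorem bloop_go (need : Int) (rest buckets : List Int)
    (h : (max need 1).toNat ≤ rest.length) :
    bloop need rest buckets =
      bloop need
        (rest.drop ((max need 1).toNat +
          (rest.drop (max need 1).toNat).count (rest.getD ((max need 1).toNat - 1) 0)))
        (buckets ++ [rest.getD ((max need 1).toNat - 1) 0]) := by
  rw [bloop]; simp [h]

-- rle decomposition by the first run
theorem rleAux_takeWhile (l : List Int) (x n : Int) :
    rleAux x n l = (x, n + ((l.takeWhile (fun y => y == x)).length : Int))
      :: rle (l.dropWhile (fun y => y == x)) := by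
  induction l generalizing x n with
  | nil => simp [rleAux, rle]
  | cons y t ih =>
    by_cases h : x = y
    · subst h
      rw [List.takeWhile_cons_of_pos (by simp), List.dropWhile_cons_of_pos (by simp)]
      simp only [rleAux, if_pos rfl]
      rw [ih]
      simp only [List.length_cons]
      push_cast
      ring_nf
    · rw [List.takeWhile_cons_of_neg (by simp [Ne.symm h]),
        List.dropWhile_cons_of_neg (by simp [Ne.symm h])]
      simp only [rleAux, if_neg h, List.length_nil, Nat.cast_zero, add_zero]
      rw [show rle (y :: t) = rleAux y 1 t from rfl]

theorem rle_cons (x : Int) (t : List Int) :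
    rle (x :: t) = (x, (((x :: t).takeWhile (fun y => y == x)).length : Int))
      :: rle ((x :: t).dropWhile (fun y => y == x)) := by
  rw [show rle (x :: t) = rleAux x 1 t from rfl, rleAux_takeWhile,
    List.takeWhile_cons_of_pos (by simp), List.dropWhile_cons_of_pos (by simp)]
  simp only [List.length_cons]
  push_cast
  ring_nf

-- elements after the first run are strictly smaller (descending-sorted list)
theorem dropWhile_lt (l : List Int) (x : Int) (h : ∀ y ∈ l, y ≤ x)
    (hp : l.Pairwise (fun a b => b ≤ a)) :
    ∀ y ∈ l.dropWhile (fun y => y == x), y < x := by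
  induction l with
  | nil => simp
  | cons z t ih =>
    rw [List.pairwise_cons] at hp
    by_cases hz : (z == x) = true
    · simp only [List.dropWhile_cons, hz, if_true]
      exact ih (fun y hy => h y (List.mem_cons_of_mem _ hy)) hp.2
    · simp only [List.dropWhile_cons, hz, if_false]
      intro y hy
      have hzx : z < x := lt_of_le_of_ne (h z (List.mem_cons_self ..)) (by simpa using hz)
      rcases List.mem_cons.mp hy with h1 | h1
      · exact h1 ▸ hzx
      · exact lt_of_le_of_lt (hp.1 y h1) hzx

-- MAIN BRIDGE: greedy fold over the run-length groups = B's slice-jump loop.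
-- pre is the segment consumed since the last emission (A's carry = |pre|).
theorem main_bridge_nil (bs : Int) (pre acc : List Int)
    (hinv : pre = [] ∨ (0 < pre.length ∧ (pre.length : Int) < bs * 4)) :
    (rle []).foldl (gstep bs) (acc, (pre.length : Int)) =
      ((bloop (4 * bs) (pre ++ []) acc).1,
        (((bloop (4 * bs) (pre ++ []) acc).2).length : Int)) := by
  have hs1 : (1 : Int) ≤ max (4 * bs) 1 := le_max_right _ _
  have hs4 : 4 * bs ≤ max (4 * bs) 1 := le_max_left _ _
  have hsnn : ((max (4 * bs) 1).toNat : Int) = max (4 * bs) 1 := Int.toNat_of_nonneg (by omega)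
  have hplt : pre.length < (max (4 * bs) 1).toNat := by
    rcases hinv with h | h
    · subst h; simp only [List.length_nil]; omega
    · omega
  have hstop : ¬ ((max (4 * bs) 1).toNat ≤ (pre ++ ([] : List Int)).length) := by
    simp only [List.append_nil]; omega
  rw [bloop_stop _ _ _ hstop]
  simp [rle]

-- MAIN BRIDGE: greedy fold over the run-length groups = B's slice-jump loop.
-- pre is the segment consumed since the last emission (A's carry = |pre|);
-- n bounds arr.length for the induction.
theorem main_bridge_aux (bs : Int) (n : Nat) (arr pre acc : List Int)
    (hn : arr.length ≤ n)
    (hsort : (pre ++ arr).Pairwise (fun a b => b ≤ a))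
    (hbd : ∀ b ∈ arr, ∀ a ∈ pre, b < a)
    (hinv : pre = [] ∨ (0 < pre.length ∧ (pre.length : Int) < bs * 4)) :
    (rle arr).foldl (gstep bs) (acc, (pre.length : Int)) =
      ((bloop (4 * bs) (pre ++ arr) acc).1,
        (((bloop (4 * bs) (pre ++ arr) acc).2).length : Int)) := by
  induction n generalizing arr pre acc with
  | zero =>
    have h0 : arr = [] := List.length_eq_zero_iff.mp (Nat.le_zero.mp hn)
    subst h0
    exact main_bridge_nil bs pre acc hinv
  | succ n ih =>
    have hs1 : (1 : Int) ≤ max (4 * bs) 1 := le_max_right _ _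
    have hs4 : 4 * bs ≤ max (4 * bs) 1 := le_max_left _ _
    have hsnn : ((max (4 * bs) 1).toNat : Int) = max (4 * bs) 1 := Int.toNat_of_nonneg (by omega)
    have hplt : pre.length < (max (4 * bs) 1).toNat := by
      rcases hinv with h | h
      · subst h; simp only [List.length_nil]; omega
      · omega
    cases arr with
    | nil => exact main_bridge_nil bs pre acc hinv
    | cons x t =>
      have harr_pw : (x :: t).Pairwise (fun a b : Int => b ≤ a) :=
        (List.pairwise_append.mp hsort).2.1
      have hub : ∀ y ∈ x :: t, y ≤ x := by
        intro y hy
        rcases List.mem_cons.mp hy with h | h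
        · exact le_of_eq h
        · exact (List.pairwise_cons.mp harr_pw).1 y h
      have hsplit : (x :: t.takeWhile (fun y => y == x)) ++ t.dropWhile (fun y => y == x)
          = x :: t := by
        rw [List.cons_append, List.takeWhile_append_dropWhile]
      have hrun_all : ∀ y ∈ x :: t.takeWhile (fun y => y == x), y = x := by
        intro y hy
        rcases List.mem_cons.mp hy with h | h
        · exact h
        · simpa using List.mem_takeWhile_imp h
      have hlt : ∀ y ∈ t.dropWhile (fun y => y == x), y < x := by
        have := dropWhile_lt (x :: t) x hub harr_pw
        rw [List.dropWhile_cons_of_pos (by simp)] at this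
        exact this
      have hcount0 : (t.dropWhile (fun y => y == x)).count x = 0 := by
        rw [List.count_eq_zero]
        intro hm
        exact absurd rfl (ne_of_lt (hlt x hm)).symm
      have hrest_pw : (t.dropWhile (fun y => y == x)).Pairwise (fun a b : Int => b ≤ a) :=
        (List.pairwise_cons.mp harr_pw).2.sublist (List.dropWhile_sublist _)
      have hrest_sub : ∀ y ∈ t.dropWhile (fun y => y == x), y ∈ x :: t := by
        intro y hy
        exact List.mem_cons_of_mem _ ((List.dropWhile_sublist _).subset hy)
      have hrle : rle (x :: t)
          = (x, ((t.takeWhile (fun y => y == x)).length : Int) + 1)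
            :: rle (t.dropWhile (fun y => y == x)) := by
        rw [rle_cons, List.takeWhile_cons_of_pos (by simp),
          List.dropWhile_cons_of_pos (by simp)]
        simp only [List.length_cons]
        push_cast
        ring_nf
      have hL : pre ++ x :: t
          = (pre ++ (x :: t.takeWhile (fun y => y == x))) ++ t.dropWhile (fun y => y == x) := by
        rw [List.append_assoc, hsplit]
      have hlen : (pre ++ (x :: t.takeWhile (fun y => y == x))).length
          = pre.length + ((t.takeWhile (fun y => y == x)).length + 1) := by
        simp [List.length_append]
      rw [hrle]
      simp only [List.foldl_cons, gstep]
      by_cases hemit : (pre.length : Int) + (((t.takeWhile (fun y => y == x)).length : Int) + 1)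
          ≥ bs * 4
      · rw [if_pos hemit]
        have hlb : (t.dropWhile (fun y => y == x)).length ≤ n := by
          have h := List.length_dropWhile_le (fun y => y == x) t
          simp only [List.length_cons] at hn
          omega
        have hrec := ih (t.dropWhile (fun y => y == x)) [] (acc ++ [x]) hlb
          (by simpa using hrest_pw) (by simp) (Or.inl rfl)
        simp only [List.nil_append, List.length_nil, Nat.cast_zero] at hrec
        rw [hrec]
        -- one unfolding of bloop on pre ++ x :: t consumes exactly pre and the run
        have hsle : (max (4 * bs) 1).toNat
            ≤ pre.length + ((t.takeWhile (fun y => y == x)).length + 1) := by omega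
        have hgo : (max (4 * bs) 1).toNat ≤ (pre ++ x :: t).length := by
          rw [hL, List.length_append, hlen]; omega
        have hgetD : (pre ++ x :: t).getD ((max (4 * bs) 1).toNat - 1) 0 = x := by
          rw [hL, List.getD_append _ _ _ _ (by rw [hlen]; omega),
            List.getD_append_right _ _ _ _ (by omega),
            List.getD_eq_getElem _ _ (by simp only [List.length_cons]; omega)]
          exact hrun_all _ (List.getElem_mem _)
        have hdropmid : (pre ++ (x :: t.takeWhile (fun y => y == x))).drop
              ((max (4 * bs) 1).toNat)
            = (x :: t.takeWhile (fun y => y == x)).drop ((max (4 * bs) 1).toNat - pre.length) := by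
          rw [List.drop_append, List.drop_eq_nil_of_le (by omega), List.nil_append]
        have hdropstep : (pre ++ x :: t).drop ((max (4 * bs) 1).toNat)
            = (x :: t.takeWhile (fun y => y == x)).drop ((max (4 * bs) 1).toNat - pre.length)
              ++ t.dropWhile (fun y => y == x) := by
          rw [hL, List.drop_append,
            show (max (4 * bs) 1).toNat - (pre ++ (x :: t.takeWhile (fun y => y == x))).length
              = 0 by rw [hlen]; omega, List.drop_zero, hdropmid]
        have hcnt : (((pre ++ x :: t).drop ((max (4 * bs) 1).toNat)).count x)
            = pre.length + ((t.takeWhile (fun y => y == x)).length + 1)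
              - (max (4 * bs) 1).toNat := by
          rw [hdropstep, List.count_append, hcount0, Nat.add_zero,
            List.count_eq_length.mpr
              (fun b hb => (hrun_all b ((List.drop_subset _ _) hb)).symm),
            List.length_drop]
          simp only [List.length_cons]
          omega
        have hcut : (max (4 * bs) 1).toNat
              + (((pre ++ x :: t).drop ((max (4 * bs) 1).toNat)).count x)
            = (pre ++ (x :: t.takeWhile (fun y => y == x))).length := by
          rw [hcnt, hlen]; omega
        rw [bloop_go _ _ _ hgo, hgetD, hcut, hL, List.drop_left]
      · rw [if_neg hemit]
        have hlb : (t.dropWhile (fun y => y == x)).length ≤ n := by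
          have h := List.length_dropWhile_le (fun y => y == x) t
          simp only [List.length_cons] at hn
          omega
        have hrec := ih (t.dropWhile (fun y => y == x))
          (pre ++ (x :: t.takeWhile (fun y => y == x))) acc hlb
          (by rw [← hL]; exact hsort)
          (by
            intro b hb a ha
            rcases List.mem_append.mp ha with h1 | h1
            · exact hbd b (hrest_sub b hb) a h1
            · rw [hrun_all a h1]; exact hlt b hb)
          (by
            right
            refine ⟨by simp, ?_⟩
            rw [hlen]
            push_cast
            omega)
        have hcarry : (pre.length : Int) + (((t.takeWhile (fun y => y == x)).length : Int) + 1)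
            = (((pre ++ (x :: t.takeWhile (fun y => y == x))).length : Int)) := by
          rw [hlen]; push_cast; ring
        rw [hcarry, hrec, List.append_assoc, hsplit]

theorem main_bridge (bs : Int) (arr pre acc : List Int)
    (hsort : (pre ++ arr).Pairwise (fun a b => b ≤ a))
    (hbd : ∀ b ∈ arr, ∀ a ∈ pre, b < a)
    (hinv : pre = [] ∨ (0 < pre.length ∧ (pre.length : Int) < bs * 4)) :
    (rle arr).foldl (gstep bs) (acc, (pre.length : Int)) =
      ((bloop (4 * bs) (pre ++ arr) acc).1,
        (((bloop (4 * bs) (pre ++ arr) acc).2).length : Int)) :=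
  main_bridge_aux bs arr.length arr pre acc le_rfl hsort hbd hinv

-- ===== VERDICT (by name: the statement is the Claim_ definition above) =====
theorem compute_bucket_boundaries_spec : Claim_equal_compute_bucket_boundaries := by
  intro seq bs _ hpre
  unfold Spec_compute_bucket_boundaries compute_bucket_boundaries compute_bucket_boundaries_alt
  dsimp only
  rw [← PySem.Dict.counter_eq_foldl, sorted2_items_eq_rle]
  have hds : (PySem.List.sorted seq (fun x => x) true).Pairwise (fun a b => b ≤ a) :=
    PySem.List.sorted_pairwise_rev seq (fun x => x)
  have hbridge := main_bridge bs (PySem.List.sorted seq (fun x => x) true) [] []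
    (by simpa using hds) (by simp) (Or.inl rfl)
  simp only [List.nil_append, List.length_nil, Nat.cast_zero] at hbridge
  rw [hbridge]
  set st := bloop (4 * bs) (PySem.List.sorted seq (fun x => x) true) [] with hstdef
  have hpw : st.1.Pairwise (fun a b => b < a) := by
    have hfold : ((rle (PySem.List.sorted seq (fun x => x) true)).foldl (gstep bs) ([], 0)).1
        = st.1 := by rw [hbridge]
    rw [← hfold]
    refine List.Pairwise.sublist ?_ (List.pairwise_map.mpr (rle_pairwise _ hds))
    have hsub := greedy_sublist bs (rle (PySem.List.sorted seq (fun x => x) true)) [] 0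
    simpa using hsub
  by_cases hc : (st.2.length : Int) < bs * 3 ∧ (st.2.length : Int) ≠ 0
  · by_cases hne : st.1 = []
    · exfalso
      have hsum := greedy_empty bs (rle (PySem.List.sorted seq (fun x => x) true)) [] 0
        (by rw [hbridge]; exact hne)
      rw [hbridge, rle_sum, PySem.List.length_sorted] at hsum
      simp only [zero_add] at hsum
      exact hpre ⟨by omega, by omega⟩
    · have hpop := PySem.List.pop?_last st.1.dropLast (st.1.getLast hne)
      rw [List.dropLast_append_getLast hne] at hpop
      rw [if_pos hc, if_pos ⟨by omega, by omega, hne⟩, hpop]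
      exact sorted_eq_reverse_of_desc _ (hpw.sublist (List.dropLast_sublist st.1))
  · rw [if_neg hc, if_neg (by push_neg at hc ⊢; intro h1 h2; omega)]
    exact sorted_eq_reverse_of_desc _ hpw
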